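-- pv_equiv track=rewrite | github.com/kevin-v96/codesignal-arcade | Core/31. increaseNumberRoundness.py | solution
-- ===== SOURCE A (Python) =====
-- def solution(n):
--     strn = str(n)
--     rightmostEncountered = False
--     for i in range(len(strn) - 1, -1, -1):
--         if strn[i] != '0' and not rightmostEncountered:
--             rightmostEncountered = True
--         elif strn[i] == '0' and rightmostEncountered:
--             return True
--     return False
-- ===== SOURCE B (Python) =====
-- def solution(n):
--     m = abs(n)
--     while m and m % 10 == 0:
--         m //= 10
--     while m:
--         if m % 10 == 0:
--             return True
--         m //= 10
--     return False
-- ===== Notes on version B (the rewrite author's own statement) =====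
-- stated objective: alternative
-- what changed: Replaces the string scan over str(n) with pure integer arithmetic: strip trailing zeros by repeated division by ten, then scan the remaining digits for a zero via modulo ten -- no string is built at all.
import Mathlib
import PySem

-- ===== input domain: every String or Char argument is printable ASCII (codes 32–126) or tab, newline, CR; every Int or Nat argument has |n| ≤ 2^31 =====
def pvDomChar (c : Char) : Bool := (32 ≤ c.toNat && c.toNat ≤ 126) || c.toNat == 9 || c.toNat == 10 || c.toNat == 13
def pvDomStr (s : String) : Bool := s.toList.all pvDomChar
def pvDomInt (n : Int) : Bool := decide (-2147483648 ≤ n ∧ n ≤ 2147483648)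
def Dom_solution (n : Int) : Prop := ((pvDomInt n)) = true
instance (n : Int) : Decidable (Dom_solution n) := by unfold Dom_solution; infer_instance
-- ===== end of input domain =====

-- B is an alternative algorithm: pure integer arithmetic (strip trailing zeros by /10, then
-- scan the remaining digits via %10) instead of A's scan over the characters of str(n).

-- ===== PORT A =====
-- the right-to-left loop 'for i in range(len(strn)-1, -1, -1)' with early return,
-- as structural recursion over the reversed character list with the flag as state
def solutionLoop : List Char → Bool → Bool
  | [], _ => false
  | c :: rest, flag =>
    if c ≠ '0' ∧ ¬ flag then solutionLoop rest true
    else if c = '0' ∧ flag then true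
    else solutionLoop rest flag

def solution (n : Int) : Bool :=
  solutionLoop (PySem.Int.toChars n).reverse false

-- ===== PORT B =====
-- 'while m and m % 10 == 0: m //= 10' (m = abs(n), a Nat)
def dropZeros (m : Nat) : Nat :=
  if m ≠ 0 ∧ m % 10 = 0 then dropZeros (m / 10) else m
  decreasing_by exact Nat.div_lt_self (by omega) (by omega)

-- 'while m: if m % 10 == 0: return True; m //= 10; return False'
def hasZ (m : Nat) : Bool :=
  if m = 0 then false
  else if m % 10 = 0 then true
  else hasZ (m / 10)
  decreasing_by exact Nat.div_lt_self (by omega) (by omega)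

def solution_alt (n : Int) : Bool :=
  hasZ (dropZeros n.natAbs)

-- ===== PRECONDITION & SPEC =====
def Spec_solution (n : Int) (out : Bool) : Prop := out = solution_alt n
instance (n : Int) (out : Bool) : Decidable (Spec_solution n out) := by unfold Spec_solution; infer_instance

-- ===== CLAIM (what is proved, stated in full; the proofs are below) =====
def Claim_equal_solution : Prop := ∀ (n : Int), Dom_solution n → Spec_solution n (solution n)

-- ===== LEMMAS AND PROOFS =====

-- reversed (least-significant-first) decimal digit characters of a Nat
def digitsR (m : Nat) : List Char :=
  Nat.digitChar (m % 10) :: (if m / 10 = 0 then [] else digitsR (m / 10))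
  decreasing_by exact Nat.div_lt_self (by omega) (by omega)

theorem solutionLoop_true (l : List Char) : solutionLoop l true = decide ('0' ∈ l) := by
  induction l with
  | nil => simp [solutionLoop]
  | cons c rest ih =>
    by_cases hc : c = '0'
    · simp [solutionLoop, hc]
    · simp [solutionLoop, hc, ih, Ne.symm hc]

theorem solutionLoop_false (l : List Char) :
    solutionLoop l false = decide ('0' ∈ l.dropWhile (· == '0')) := by
  induction l with
  | nil => simp [solutionLoop]
  | cons c rest ih =>
    by_cases hc : c = '0'
    · simp [solutionLoop, hc, ih]
    · simp [solutionLoop, hc, solutionLoop_true, List.mem_cons, Ne.symm hc]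

theorem digitChar_eq_zero (d : Nat) (h : d < 10) : (Nat.digitChar d = '0') ↔ d = 0 := by
  interval_cases d <;> simp [Nat.digitChar]

theorem toDigitsCore_eq (fuel : Nat) : ∀ (n : Nat) (acc : List Char), n < fuel →
    Nat.toDigitsCore 10 fuel n acc = (digitsR n).reverse ++ acc := by
  induction fuel with
  | zero => intro n acc h; omega
  | succ fuel ih =>
    intro n acc h
    rw [Nat.toDigitsCore]
    by_cases hz : n / 10 = 0
    · simp [hz, digitsR]
    · simp only [hz, if_false]
      rw [ih (n / 10) _ (by have := Nat.div_lt_self (by omega : 0 < n) (by omega : 1 < 10); omega)]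
      conv_rhs => rw [digitsR, if_neg hz]
      simp

theorem toDigits_eq (m : Nat) : Nat.toDigits 10 m = (digitsR m).reverse := by
  rw [Nat.toDigits, toDigitsCore_eq (m + 1) m [] (by omega)]
  simp

theorem hasZ_eq (k : Nat) (hk : k ≠ 0) : hasZ k = decide ('0' ∈ digitsR k) := by
  induction k using Nat.strong_induction_on with
  | _ k ih =>
    rw [hasZ, digitsR]
    simp only [hk, if_false]
    have hmod : k % 10 < 10 := Nat.mod_lt _ (by omega)
    by_cases h0 : k % 10 = 0
    · simp [h0, Nat.digitChar]
    · have hne : Nat.digitChar (k % 10) ≠ '0' := by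
        intro h; exact h0 ((digitChar_eq_zero _ hmod).mp h)
      by_cases hq : k / 10 = 0
      · simp [h0, hq, hasZ, Ne.symm hne]
      · rw [if_neg h0, ih (k / 10) (Nat.div_lt_self (by omega) (by omega)) hq]
        simp [hq, Ne.symm hne]

theorem main_eq (m : Nat) :
    decide ('0' ∈ (digitsR m).dropWhile (· == '0')) = hasZ (dropZeros m) := by
  induction m using Nat.strong_induction_on with
  | _ m ih =>
    by_cases hm : m = 0
    · subst hm
      have h1 : digitsR 0 = ['0'] := by rw [digitsR]; norm_num [Nat.digitChar]
      have h2 : dropZeros 0 = 0 := by rw [dropZeros]; simp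
      have h3 : hasZ 0 = false := by rw [hasZ]; simp
      rw [h1, h2, h3]; decide
    · by_cases h0 : m % 10 = 0
      · have hq : m / 10 ≠ 0 := by omega
        rw [digitsR]
        simp only [h0, Nat.digitChar, hq, if_false]
        rw [List.dropWhile_cons_of_pos (by decide)]
        rw [ih (m / 10) (Nat.div_lt_self (by omega) (by omega))]
        conv_rhs => rw [dropZeros, if_pos (⟨hm, h0⟩ : m ≠ 0 ∧ m % 10 = 0)]
      · have hne : Nat.digitChar (m % 10) ≠ '0' := by
          intro h; exact h0 ((digitChar_eq_zero _ (Nat.mod_lt _ (by omega))).mp h)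
        have hstop : (digitsR m).dropWhile (· == '0') = digitsR m := by
          rw [digitsR, List.dropWhile_cons_of_neg (by simp [hne]), ← digitsR]
        rw [hstop, dropZeros]
        simp only [hm, h0, ne_eq, not_false_iff, true_and, false_and, if_false]
        exact (hasZ_eq m hm).symm

theorem dropWhile_digitsR_ne_nil (m : Nat) (hm : m ≠ 0) :
    (digitsR m).dropWhile (· == '0') ≠ [] := by
  induction m using Nat.strong_induction_on with
  | _ m ih =>
    by_cases h0 : m % 10 = 0
    · have hq : m / 10 ≠ 0 := by omega
      rw [digitsR]
      simp only [h0, Nat.digitChar, hq, if_false]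
      rw [List.dropWhile_cons_of_pos (by decide)]
      exact ih (m / 10) (Nat.div_lt_self (by omega) (by omega)) hq
    · have hne : Nat.digitChar (m % 10) ≠ '0' := by
        intro h; exact h0 ((digitChar_eq_zero _ (Nat.mod_lt _ (by omega))).mp h)
      rw [digitsR, List.dropWhile_cons_of_neg (by simp [hne])]
      simp

-- ===== VERDICT (by name: the statement is the Claim_ definition above) =====
theorem solution_spec : Claim_equal_solution := by
  intro n _
  unfold Spec_solution solution solution_alt
  rw [solutionLoop_false]
  unfold PySem.Int.toChars
  by_cases hn : n < 0
  · have hm : n.natAbs ≠ 0 := by omega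
    simp only [hn, if_true, toDigits_eq]
    rw [List.reverse_cons, List.reverse_reverse, List.dropWhile_append]
    simp only [List.isEmpty_iff, dropWhile_digitsR_ne_nil n.natAbs hm, if_false]
    rw [← main_eq n.natAbs]
    simp
  · have habs : n.toNat = n.natAbs := by omega
    simp only [hn, if_false, toDigits_eq, List.reverse_reverse, habs]
    exact main_eq n.natAbs
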